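-- pv_equiv track=rewrite | github.com/teremok2007/DNK | dnk_master/dnk_core/python/google_sheet_add.py | createAlphabetDict
-- ===== SOURCE A (Python) =====
-- import string
--
-- def createAlphabetDict(iter):
--     off=0
--     d={}
--     ch=[]
--     for i in range(1,iter):
--         for n, ch in (enumerate(string.ascii_uppercase)):
--             d[n+off]=ch*i
--         off=off+26
--     return d
-- ===== SOURCE B (Python) =====
-- import string
--
-- def createAlphabetDict(iter):
--     d = {}
--     for k in range(26 * (iter - 1)):
--         d[k] = string.ascii_uppercase[k % 26] * (k // 26 + 1)
--     return d
-- ===== Notes on version B (the rewrite author's own statement) =====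
-- stated objective: simpler
-- what changed: Replaces the nested row/letter loops with a mutable offset accumulator by a single flat pass over range(26*(iter-1)), computing each key's letter and repeat count by modular arithmetic (k % 26, k // 26 + 1).
import Mathlib
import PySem

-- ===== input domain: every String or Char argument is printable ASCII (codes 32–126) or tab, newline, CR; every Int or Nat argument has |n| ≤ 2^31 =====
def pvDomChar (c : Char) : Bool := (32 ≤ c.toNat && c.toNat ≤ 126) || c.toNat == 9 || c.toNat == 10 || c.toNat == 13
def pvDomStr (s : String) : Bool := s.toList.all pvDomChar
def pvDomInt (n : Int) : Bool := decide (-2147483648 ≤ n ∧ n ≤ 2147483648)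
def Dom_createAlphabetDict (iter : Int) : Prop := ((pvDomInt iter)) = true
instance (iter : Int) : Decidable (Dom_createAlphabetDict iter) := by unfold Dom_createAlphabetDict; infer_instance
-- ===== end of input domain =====

-- B replaces A's nested row/letter loops and mutable offset accumulator by one flat pass
-- over range(26*(iter-1)) using k % 26 and k // 26 + 1 (objective: simpler).

-- exact port of Python "ch * n" for a one-character string ch (n <= 0 gives "")
def pvRepeat (c : Char) (n : Int) : String := String.ofList (List.replicate n.toNat c)

-- string.ascii_uppercase as a char list
def pvAlpha : List Char := "ABCDEFGHIJKLMNOPQRSTUVWXYZ".toList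

-- ===== PORT A =====
-- state st = (d, off); for i in range(1, iter): for (n, ch) in enumerate(ascii_uppercase): d[n+off] = ch*i; off += 26
def createAlphabetDict (iter : Int) : List (Int × String) :=
  ((PySem.List.pyRange 1 iter).foldl
    (fun (st : PySem.Dict Int String × Int) i =>
      ((PySem.List.enumerate pvAlpha 0).foldl
         (fun d p => d.insert (p.1 + st.2) (pvRepeat p.2 i)) st.1,
       st.2 + 26))
    (PySem.Dict.empty, 0)).1.items

-- ===== PORT B =====
-- for k in range(26*(iter-1)): d[k] = ascii_uppercase[k % 26] * (k // 26 + 1)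
-- ascii_uppercase[k % 26] is always in range (0 ≤ k % 26 < 26), so pyGet? is always
-- some; the .getD 'A' default is never used.
def createAlphabetDict_alt (iter : Int) : List (Int × String) :=
  ((PySem.List.pyRange 0 (26 * (iter - 1))).foldl
    (fun (d : PySem.Dict Int String) k =>
      d.insert k (pvRepeat
        ((PySem.Str.pyGet? "ABCDEFGHIJKLMNOPQRSTUVWXYZ" (PySem.Int.mod k 26)).getD 'A')
        (PySem.Int.floordiv k 26 + 1)))
    PySem.Dict.empty).items

-- ===== PRECONDITION & SPEC =====
def Spec_createAlphabetDict (iter : Int) (out : List (Int × String)) : Prop := out = createAlphabetDict_alt iter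
instance (iter : Int) (out : List (Int × String)) : Decidable (Spec_createAlphabetDict iter out) := by unfold Spec_createAlphabetDict; infer_instance

-- ===== CLAIM (what is proved, stated in full; the proofs are below) =====
def Claim_equal_createAlphabetDict : Prop := ∀ (iter : Int), Dom_createAlphabetDict iter → Spec_createAlphabetDict iter (createAlphabetDict iter)

-- ===== LEMMAS AND PROOFS =====

-- the (key, value) pair B stores for flat index k
def pvVal (k : Int) : Int × String :=
  (k, pvRepeat ((PySem.Str.pyGet? "ABCDEFGHIJKLMNOPQRSTUVWXYZ" (PySem.Int.mod k 26)).getD 'A')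
               (PySem.Int.floordiv k 26 + 1))

-- row r of A's dict (r = 0 .. iter-2; python i = 1 + r, off = 26*r)
def pvRow (r : Nat) : List (Int × String) :=
  (PySem.List.enumerate pvAlpha 0).map (fun p => (p.1 + 26 * (r : Int), pvRepeat p.2 (1 + (r : Int))))

def pvRows (m : Nat) : List (Int × String) := (List.range m).flatMap pvRow

theorem pvRows_key_lt (m : Nat) : ∀ p ∈ pvRows m, 0 ≤ p.1 ∧ p.1 < 26 * (m : Int) := by
  intro p hp
  simp only [pvRows, List.mem_flatMap, List.mem_range, pvRow, List.mem_map,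
    PySem.List.mem_enumerate_iff] at hp
  obtain ⟨r, hr, q, ⟨k, hk, rfl⟩, rfl⟩ := hp
  have : pvAlpha.length = 26 := by decide
  rw [this] at hk
  constructor <;> push_cast <;> omega

-- loop invariant for A: after m rows the dict's items are pvRows m, its keys are
-- nodup, and off = 26*m
theorem pvA_invariant_aux (m : Nat) :
    ((List.range m).foldl
      (fun (st : PySem.Dict Int String × Int) (k : Nat) =>
        ((PySem.List.enumerate pvAlpha 0).foldl
           (fun d p => d.insert (p.1 + st.2) (pvRepeat p.2 (1 + (k : Int)))) st.1,
         st.2 + 26))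
      (PySem.Dict.empty, 0)).1.items = pvRows m ∧
    ((List.range m).foldl
      (fun (st : PySem.Dict Int String × Int) (k : Nat) =>
        ((PySem.List.enumerate pvAlpha 0).foldl
           (fun d p => d.insert (p.1 + st.2) (pvRepeat p.2 (1 + (k : Int)))) st.1,
         st.2 + 26))
      (PySem.Dict.empty, 0)).1.keys.Nodup ∧
    ((List.range m).foldl
      (fun (st : PySem.Dict Int String × Int) (k : Nat) =>
        ((PySem.List.enumerate pvAlpha 0).foldl
           (fun d p => d.insert (p.1 + st.2) (pvRepeat p.2 (1 + (k : Int)))) st.1,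
         st.2 + 26))
      (PySem.Dict.empty, 0)).2 = 26 * (m : Int) := by
  induction m with
  | zero => refine ⟨by simp [pvRows, PySem.Dict.empty], PySem.Dict.nodup_keys_empty, by simp⟩
  | succ m ih =>
    obtain ⟨hitems, hnodup, hoff⟩ := ih
    rw [List.range_succ]
    simp only [List.foldl_append, List.foldl_cons, List.foldl_nil]
    set st := ((List.range m).foldl
      (fun (st : PySem.Dict Int String × Int) (k : Nat) =>
        ((PySem.List.enumerate pvAlpha 0).foldl
           (fun d p => d.insert (p.1 + st.2) (pvRepeat p.2 (1 + (k : Int)))) st.1,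
         st.2 + 26))
      (PySem.Dict.empty, 0)) with hst
    have hfresh : ∀ p ∈ PySem.List.enumerate pvAlpha 0, st.1.contains (p.1 + st.2) = false := by
      intro p hp
      rw [← Bool.not_eq_true, PySem.Dict.contains_iff_mem_keys]
      intro hmem
      have hkeys : st.1.keys = (pvRows m).map Prod.fst := by
        simp [PySem.Dict.keys, hitems]
      rw [hkeys, List.mem_map] at hmem
      obtain ⟨q, hq, hq1⟩ := hmem
      have h1 := pvRows_key_lt m q hq
      obtain ⟨k, hk, rfl⟩ := (PySem.List.mem_enumerate_iff _ _ _).mp hp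
      rw [hoff] at hq1
      simp at hq1
      omega
    have hnd : ((PySem.List.enumerate pvAlpha 0).map (fun p => p.1 + st.2)).Nodup := by
      have : (fun (p : Int × Char) => p.1 + st.2) = (fun x => x + st.2) ∘ Prod.fst := rfl
      rw [this, ← List.map_map, PySem.List.map_fst_enumerate]
      exact (PySem.List.nodup_pyRange_one _ _).map (add_left_injective _)
    refine ⟨?_, ?_, by rw [hoff]; push_cast; ring⟩
    · rw [PySem.Dict.items_foldl_insert_fresh (PySem.List.enumerate pvAlpha 0)
        (fun p => p.1 + st.2) (fun p => pvRepeat p.2 (1 + (m : Int))) st.1 hfresh hnd,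
        hitems, hoff]
      simp [pvRows, pvRow, List.range_succ]
    · exact PySem.Dict.nodup_keys_foldl_insert_key _ _ _ _ hnodup

theorem pvA_items (iter : Int) :
    createAlphabetDict iter = pvRows ((iter - 1).toNat) := by
  unfold createAlphabetDict
  rw [PySem.List.pyRange_one 1 iter, List.foldl_map]
  exact (pvA_invariant_aux ((iter - 1).toNat)).1

-- B's dict inserts only fresh distinct keys from empty, so its items are the flat map
theorem pvB_items (iter : Int) :
    createAlphabetDict_alt iter = (PySem.List.pyRange 0 (26 * (iter - 1))).map pvVal := by
  unfold createAlphabetDict_alt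
  rw [PySem.Dict.items_foldl_insert_fresh (PySem.List.pyRange 0 (26 * (iter - 1)))
    (fun k => k)
    (fun k => pvRepeat ((PySem.Str.pyGet? "ABCDEFGHIJKLMNOPQRSTUVWXYZ" (PySem.Int.mod k 26)).getD 'A')
        (PySem.Int.floordiv k 26 + 1))
    PySem.Dict.empty (by intro a _; exact PySem.Dict.contains_empty a)
    (by simpa using PySem.List.nodup_pyRange_one 0 (26 * (iter - 1)))]
  simp [pvVal, PySem.Dict.empty]

-- the flat enumeration of 26*m indices, split by rows, is A's dict
theorem pvBridge (m : Nat) :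
    (List.range (26 * m)).map (fun (k : Nat) => pvVal (k : Int)) = pvRows m := by
  induction m with
  | zero => simp [pvRows]
  | succ m ih =>
    have h26 : 26 * (m + 1) = 26 * m + 26 := by ring
    rw [pvRows, List.range_succ, List.flatMap_append, ← pvRows, h26, List.range_add,
      List.map_append, ih, List.map_map]
    congr 1
    simp only [List.flatMap_cons, List.flatMap_nil, List.append_nil]
    apply List.ext_getElem
    · simp [pvRow, pvAlpha]
    · intro n h1 h2
      simp only [List.getElem_map, List.getElem_range, Function.comp_apply, pvRow,
        PySem.List.getElem_enumerate]
      have hlen : pvAlpha.length = 26 := by decide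
      have hn : n < 26 := by
        simpa [pvRow, hlen] using h2
      have hdiv : PySem.Int.floordiv ((26 * m + n : Nat) : Int) 26 = (m : Int) := by
        rw [PySem.Int.floordiv_eq_iff_of_pos (by omega)]
        push_cast
        omega
      have hmod : PySem.Int.mod ((26 * m + n : Nat) : Int) 26 = (n : Int) := by
        have := PySem.Int.floordiv_mul_add_mod ((26 * m + n : Nat) : Int) 26
        rw [hdiv] at this
        push_cast at this ⊢
        omega
      simp only [pvVal, hdiv, hmod]
      have hget : PySem.Str.pyGet? "ABCDEFGHIJKLMNOPQRSTUVWXYZ" ((n : Nat) : Int)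
          = pvAlpha[n]? := by
        rw [PySem.Str.pyGet?_natCast]
        rfl
      rw [hget, List.getElem?_eq_getElem (by omega)]
      refine Prod.ext ?_ ?_
      · show ((26 * m + n : Nat) : Int) = 0 + (n : Int) + 26 * (m : Int)
        push_cast
        ring
      · show pvRepeat ((some pvAlpha[n]).getD 'A') ((m : Int) + 1) = pvRepeat pvAlpha[n] (1 + (m : Int))
        rw [Option.getD_some, add_comm (m : Int) 1]

-- ===== VERDICT (by name: the statement is the Claim_ definition above) =====
theorem createAlphabetDict_spec : Claim_equal_createAlphabetDict := by
  intro iter _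
  unfold Spec_createAlphabetDict
  rw [pvA_items, pvB_items, PySem.List.pyRange_one 0, List.map_map]
  have h : (26 * (iter - 1) - 0).toNat = 26 * ((iter - 1).toNat) := by omega
  rw [h, ← pvBridge ((iter - 1).toNat)]
  simp [Function.comp]
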